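-- pv_equiv track=rewrite | github.com/mythral-tech/dojigiri | wiz/fixer.py | _in_multiline_string
-- ===== SOURCE A (Python) =====
-- def _in_multiline_string(content: str, line_num: int) -> bool:
--     """Check if a 1-indexed line is inside a multiline triple-quoted string."""
--     lines = content.splitlines()
--     in_triple = False
--     for i, cur_line in enumerate(lines):
--         if i + 1 == line_num:
--             return in_triple
--         stripped = cur_line.strip()
--         for tq in ('"""', "'''"):
--             if stripped.count(tq) % 2 == 1:
--                 in_triple = not in_triple
--     return False
-- ===== SOURCE B (Python) =====
-- def _in_multiline_string(content: str, line_num: int) -> bool: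
--     """Check if a 1-indexed line is inside a multiline triple-quoted string.
--
--     Builds the explicit list of toggle lines, pairs them into closed intervals
--     of in-string lines, and tests the target line for interval membership.
--     """
--     lines = content.splitlines()
--     k = line_num - 1  # 0-indexed target line
--     if k < 0 or k >= len(lines):
--         return False
--     toggles = [i for i, ln in enumerate(lines)
--                if (ln.strip().count('"""') + ln.strip().count("'''")) % 2 == 1]
--     if len(toggles) % 2 == 1:
--         toggles.append(len(lines))  # unterminated string runs to end of file
--     for j in range(0, len(toggles), 2):
--         if toggles[j] < k <= toggles[j + 1]:
--             return True
--     return False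
-- ===== Notes on version B (the rewrite author's own statement) =====
-- stated objective: alternative
-- what changed: Replaces A's boolean-toggle scan with an interval construction: B collects the indices of toggle lines, pairs consecutive ones into in-string intervals (closing an unterminated string at end of file), and answers by interval-membership of the target line.
import Mathlib
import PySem

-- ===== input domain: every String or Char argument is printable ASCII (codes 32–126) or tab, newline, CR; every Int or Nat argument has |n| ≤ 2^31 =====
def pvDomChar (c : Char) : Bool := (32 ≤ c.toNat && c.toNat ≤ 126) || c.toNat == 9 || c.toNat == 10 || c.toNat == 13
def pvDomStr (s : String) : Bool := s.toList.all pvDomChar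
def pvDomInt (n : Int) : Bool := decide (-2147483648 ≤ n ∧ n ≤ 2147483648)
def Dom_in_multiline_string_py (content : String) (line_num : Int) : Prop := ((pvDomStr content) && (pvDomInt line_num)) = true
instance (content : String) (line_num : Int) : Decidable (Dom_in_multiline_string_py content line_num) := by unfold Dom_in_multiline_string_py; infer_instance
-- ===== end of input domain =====

-- B replaces A's boolean-threaded scan with an interval construction: it collects the
-- toggle-line indices, pairs them into in-string intervals, and tests the target line
-- for membership in one of them (objective: alternative).

-- ===== PORT A =====
-- the inner 'for tq in ('"""', "'''")' toggle loop of A, threading in_triple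
def pvStepA (cur_line : String) (in_triple : Bool) : Bool :=
  let stripped := PySem.Str.strip cur_line
  ["\"\"\"", "'''"].foldl
    (fun t tq => if PySem.Str.count stripped tq % 2 == 1 then !t else t) in_triple

-- A's main loop: enumerate(lines) with index i, early return at i + 1 == line_num
def pvLoopA : List String → Int → Bool → Int → Bool
  | [], _, _, _ => false
  | cur_line :: rest, i, in_triple, line_num =>
      if i + 1 = line_num then in_triple
      else pvLoopA rest (i + 1) (pvStepA cur_line in_triple) line_num

def in_multiline_string_py (content : String) (line_num : Int) : Bool :=
  pvLoopA (PySem.Str.splitlines content) 0 false line_num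

-- ===== PORT B =====
-- B's toggle-line test: (ln.strip().count('"""') + ln.strip().count("'''")) % 2 == 1
def pvToggleB (ln : String) : Bool :=
  (PySem.Str.count (PySem.Str.strip ln) "\"\"\"" + PySem.Str.count (PySem.Str.strip ln) "'''") % 2 == 1

-- B's pairing loop: for j in range(0, len(toggles), 2): if toggles[j] < k <= toggles[j+1] ...
def pvPairScan : List Int → Int → Bool
  | a :: b :: rest, k => if a < k ∧ k ≤ b then true else pvPairScan rest k
  | _, _ => false

def in_multiline_string_py_alt (content : String) (line_num : Int) : Bool :=
  let lines := PySem.Str.splitlines content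
  let k := line_num - 1
  if k < 0 ∨ k ≥ (lines.length : Int) then false
  else
    let toggles := ((PySem.List.enumerate lines).filter (fun p => pvToggleB p.2)).map Prod.fst
    let toggles := if toggles.length % 2 == 1 then toggles ++ [(lines.length : Int)] else toggles
    pvPairScan toggles k

-- ===== PRECONDITION & SPEC =====
def Spec_in_multiline_string_py (content : String) (line_num : Int) (out : Bool) : Prop := out = in_multiline_string_py_alt content line_num
instance (content : String) (line_num : Int) (out : Bool) : Decidable (Spec_in_multiline_string_py content line_num out) := by unfold Spec_in_multiline_string_py; infer_instance

-- ===== CLAIM =====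
def Claim_equal_in_multiline_string_py : Prop := ∀ (content : String) (line_num : Int), Dom_in_multiline_string_py content line_num → Spec_in_multiline_string_py content line_num (in_multiline_string_py content line_num)

-- ===== LEMMAS AND PROOFS =====

-- A's per-line double toggle equals one xor with B's combined-parity toggle test
theorem pvStepA_eq (l : String) (b : Bool) :
    pvStepA l b = xor b (pvToggleB l) := by
  simp only [pvStepA, pvToggleB, List.foldl]
  set c1 := PySem.Str.count (PySem.Str.strip l) "\"\"\"" with hc1
  set c2 := PySem.Str.count (PySem.Str.strip l) "'''" with hc2
  by_cases h1 : c1 % 2 = 1 <;> by_cases h2 : c2 % 2 = 1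
  · have h3 : (c1 + c2) % 2 = 0 := by omega
    cases b <;> simp [h1, h2, h3]
  · have h3 : (c1 + c2) % 2 = 1 := by omega
    cases b <;> simp [h1, h2, h3]
  · have h3 : (c1 + c2) % 2 = 1 := by omega
    cases b <;> simp [h1, h2, h3]
  · have h3 : (c1 + c2) % 2 = 0 := by omega
    cases b <;> simp [h1, h2, h3]

-- characterisation of A's loop: early return at index line_num - 1 equals the
-- parity of the number of toggle lines before it
theorem pvLoopA_eq (ls : List String) (n : Int) : ∀ (i : Int) (b : Bool),
    pvLoopA ls i b n =
      if i + 1 ≤ n ∧ n ≤ i + ls.length then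
        xor b (decide ((ls.take (n - i - 1).toNat).countP pvToggleB % 2 = 1))
      else false := by
  induction ls with
  | nil =>
      intro i b
      simp only [pvLoopA, List.length_nil]
      rw [if_neg]; omega
  | cons l ls ih =>
      intro i b
      by_cases h : i + 1 = n
      · have h1 : (n - i - 1).toNat = 0 := by omega
        have hcond : i + 1 ≤ n ∧ n ≤ i + ((l :: ls).length : Int) := by
          simp only [List.length_cons]; push_cast; omega
        simp only [pvLoopA, if_pos h, if_pos hcond, h1, List.take_zero, List.countP_nil]
        simp
      · simp only [pvLoopA, if_neg h, ih (i + 1)]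
        by_cases hc : i + 1 + 1 ≤ n ∧ n ≤ i + 1 + (ls.length : Int)
        · have hcond : i + 1 ≤ n ∧ n ≤ i + ((l :: ls).length : Int) := by
            simp only [List.length_cons] at hc ⊢; push_cast at hc ⊢; omega
          rw [if_pos hc, if_pos hcond]
          have hk : (n - i - 1).toNat = (n - (i + 1) - 1).toNat + 1 := by omega
          rw [hk, List.take_succ_cons, List.countP_cons, pvStepA_eq]
          set m := (ls.take (n - (i + 1) - 1).toNat).countP pvToggleB with hm
          by_cases hp : m % 2 = 1
          · have hp1 : (m + 1) % 2 = 0 := by omega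
            cases hb : pvToggleB l <;> cases b <;> simp [hp, hp1]
          · have hp0 : m % 2 = 0 := by omega
            have hp1 : (m + 1) % 2 = 1 := by omega
            cases hb : pvToggleB l <;> cases b <;> simp [hp0, hp1]
        · have hcond : ¬(i + 1 ≤ n ∧ n ≤ i + ((l :: ls).length : Int)) := by
            simp only [List.length_cons] at hc ⊢; push_cast at hc ⊢; omega
          rw [if_neg hc, if_neg hcond]

-- the toggle-index list of B, parameterised by the enumeration start
def pvT (ls : List String) (s : Int) : List Int :=
  ((PySem.List.enumerate ls s).filter (fun p => pvToggleB p.2)).map Prod.fst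

theorem pvT_cons (l : String) (ls : List String) (s : Int) :
    pvT (l :: ls) s = (if pvToggleB l then [s] else []) ++ pvT ls (s + 1) := by
  simp only [pvT, PySem.List.enumerate_cons, List.filter_cons]
  split_ifs <;> simp

-- every toggle index lies in [s, s + len)
theorem pvT_bounds (ls : List String) (s : Int) :
    ∀ t ∈ pvT ls s, s ≤ t ∧ t < s + ls.length := by
  intro t ht
  simp only [pvT, List.mem_map, List.mem_filter] at ht
  obtain ⟨p, ⟨hp, _⟩, rfl⟩ := ht
  rw [PySem.List.mem_enumerate_iff] at hp
  obtain ⟨k, hk, rfl⟩ := hp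
  refine ⟨by simp, by simp; omega⟩

-- the toggle indices are strictly increasing
theorem pvT_sorted (ls : List String) (s : Int) : (pvT ls s).Pairwise (· < ·) := by
  induction ls generalizing s with
  | nil => simp [pvT, PySem.List.enumerate_nil]
  | cons l ls ih =>
      rw [pvT_cons]
      split_ifs
      · rw [List.singleton_append, List.pairwise_cons]
        exact ⟨fun t ht => by have := (pvT_bounds ls (s + 1) t ht).1; omega, ih (s + 1)⟩
      · simpa using ih (s + 1)

-- counting toggle indices below s + k counts the toggle lines in the first k lines
theorem pvT_countP (ls : List String) : ∀ (s : Int) (k : Nat), k ≤ ls.length →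
    (pvT ls s).countP (fun t => decide (t < s + k)) = (ls.take k).countP pvToggleB := by
  induction ls with
  | nil =>
      intro s k hk
      have hk0 : k = 0 := Nat.le_zero.mp hk
      subst hk0
      simp [pvT, PySem.List.enumerate_nil]
  | cons l ls ih =>
      intro s k hk
      rw [pvT_cons, List.countP_append]
      cases k with
      | zero =>
          simp only [Nat.cast_zero, add_zero, List.take_zero, List.countP_nil]
          have h1 : (if pvToggleB l then [s] else []).countP (fun t => decide (t < s)) = 0 := by
            split_ifs <;> simp
          have h2 : (pvT ls (s + 1)).countP (fun t => decide (t < s)) = 0 := by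
            rw [List.countP_eq_zero]
            intro t ht
            have := (pvT_bounds ls (s + 1) t ht).1
            simp; omega
          omega
      | succ k =>
          simp only [List.length_cons] at hk
          rw [List.take_succ_cons, List.countP_cons]
          have h1 : (if pvToggleB l then [s] else []).countP (fun t => decide (t < s + (k + 1 : Nat))) =
              (if pvToggleB l then 1 else 0) := by
            split_ifs <;> simp
          have h2 : (pvT ls (s + 1)).countP (fun t => decide (t < s + (k + 1 : Nat))) =
              (ls.take k).countP pvToggleB := by
            rw [← ih (s + 1) k (by omega)]
            apply List.countP_congr
            intro t _
            simp; omega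
          rw [h1, h2]
          cases hbl : pvToggleB l
          · simp
          · simp; omega

-- the pairing scan over a sorted even-length list tests the parity of the count below k
theorem pvPairScan_eq : ∀ (ts : List Int), ts.Pairwise (· < ·) → ts.length % 2 = 0 →
    ∀ k : Int, pvPairScan ts k = decide (ts.countP (fun t => decide (t < k)) % 2 = 1)
  | [], _, _, k => by simp [pvPairScan]
  | [a], _, hlen, k => by simp at hlen
  | a :: b :: rest, hpw, hlen, k => by
        have hab : a < b := by
          rcases List.pairwise_cons.1 hpw with ⟨h1, _⟩
          exact h1 b (by simp)
        have hrest_gt : ∀ t ∈ rest, b < t := by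
          rcases List.pairwise_cons.1 hpw with ⟨_, h2⟩
          rcases List.pairwise_cons.1 h2 with ⟨h3, _⟩
          exact h3
        have hpw' : rest.Pairwise (· < ·) :=
          ((List.pairwise_cons.1 (List.pairwise_cons.1 hpw).2).2)
        have hlen' : rest.length % 2 = 0 := by simp at hlen; omega
        have ihr := pvPairScan_eq rest hpw' hlen' k
        simp only [pvPairScan, List.countP_cons]
        by_cases hcase : a < k ∧ k ≤ b
        · rw [if_pos hcase]
          have h0 : rest.countP (fun t => decide (t < k)) = 0 := by
            rw [List.countP_eq_zero]; intro t ht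
            have := hrest_gt t ht; simp; omega
          have ha : decide (a < k) = true := by simp [hcase.1]
          have hb : decide (k < b ∨ k = b) ∨ True := Or.inr trivial
          have hbk : (decide (b < k) : Bool) = false := by simp; omega
          rw [h0, ha, hbk]
          simp
        · rw [if_neg hcase, ihr]
          by_cases hak : a < k
          · have hbk : b < k := by omega
            have ha' : (decide (a < k)) = true := by simp [hak]
            have hb' : (decide (b < k)) = true := by simp [hbk]
            rw [ha', hb']
            simp only [decide_eq_decide, if_true]
            constructor <;> intro <;> omega
          · have hbk : ¬ b < k := by omega
            have h0 : rest.countP (fun t => decide (t < k)) = 0 := by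
              rw [List.countP_eq_zero]; intro t ht
              have := hrest_gt t ht; simp; omega
            simp [hak, hbk, h0]

-- ===== VERDICT =====
theorem in_multiline_string_py_spec : Claim_equal_in_multiline_string_py := by
  intro content line_num _
  unfold Spec_in_multiline_string_py in_multiline_string_py in_multiline_string_py_alt
  rw [pvLoopA_eq]
  set ls := PySem.Str.splitlines content with hls
  by_cases h : line_num - 1 < 0 ∨ line_num - 1 ≥ (ls.length : Int)
  · rw [if_neg (by omega)]
    simp only [if_pos h]
  · rw [if_pos (by omega)]
    simp only [if_neg h]
    have hk0 : 0 ≤ line_num - 1 := by omega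
    have hklen : line_num - 1 < (ls.length : Int) := by omega
    -- the toggles list, possibly with the end-of-file sentinel appended
    have hTdef : ((PySem.List.enumerate ls 0).filter (fun p => pvToggleB p.2)).map Prod.fst = pvT ls 0 := rfl
    rw [hTdef]
    set T := pvT ls 0 with hT
    have hTpw : T.Pairwise (· < ·) := pvT_sorted ls 0
    have hTbd : ∀ t ∈ T, t < (ls.length : Int) := fun t ht => by
      have := (pvT_bounds ls 0 t ht).2; omega
    set k := line_num - 1 with hkdef
    -- B's scanned list
    by_cases hodd : T.length % 2 == 1
    · simp only [if_pos hodd]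
      have heven : (T ++ [(ls.length : Int)]).length % 2 = 0 := by
        simp only [List.length_append, List.length_cons, List.length_nil]
        simp at hodd; omega
      have hpw' : (T ++ [(ls.length : Int)]).Pairwise (· < ·) := by
        rw [List.pairwise_append]
        exact ⟨hTpw, by simp, fun a ha b hb => by simp at hb; subst hb; exact hTbd a ha⟩
      rw [pvPairScan_eq _ hpw' heven k]
      have hsame : (T ++ [(ls.length : Int)]).countP (fun t => decide (t < k)) =
          T.countP (fun t => decide (t < k)) := by
        rw [List.countP_append]
        have : ([(ls.length : Int)].countP (fun t => decide (t < k))) = 0 := by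
          simp; omega
        omega
      rw [hsame]
      have hcp := pvT_countP ls 0 k.toNat (by omega)
      rw [zero_add] at hcp
      have hkk : k = (k.toNat : Int) := (Int.toNat_of_nonneg hk0).symm
      rw [hT, hkk, hcp]
      have hln : (line_num - 0 - 1).toNat = k.toNat := by omega
      rw [hln]
      simp
    · simp only [if_neg hodd]
      have heven : T.length % 2 = 0 := by simp at hodd; omega
      rw [pvPairScan_eq _ hTpw heven k]
      have hcp := pvT_countP ls 0 k.toNat (by omega)
      rw [zero_add] at hcp
      have hkk : k = (k.toNat : Int) := (Int.toNat_of_nonneg hk0).symm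
      rw [hT, hkk, hcp]
      have hln : (line_num - 0 - 1).toNat = k.toNat := by omega
      rw [hln]
      simp
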